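-- pv_equiv track=rewrite | github.com/thrtnastrx/pan_tools_2 | panorama_tools_v2.0_secure.py | _cli_show_to_xml
-- ===== SOURCE A (Python) =====
-- from typing import Optional
--
-- def _cli_show_to_xml(cmd: str) -> Optional[str]:
--     """Convert plain CLI 'show ...' into nested op-XML with a self-closing leaf."""
--     try:
--         parts = [p for p in (cmd or '').strip().split() if p]
--         if not parts or parts[0].lower() != 'show':
--             return None
--         tokens = parts[1:]
--         if not tokens:
--             return '<show/>'
--         xml = ['<show>']
--         for t in tokens[:-1]:
--             xml.append(f'<{t}>')
--         xml.append(f'<{tokens[-1]}/>')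
--         for t in reversed(tokens[:-1]):
--             xml.append(f'</{t}>')
--         xml.append('</show>')
--         return ''.join(xml)
--     except Exception:
--         return None
-- ===== SOURCE B (Python) =====
-- from typing import Optional
--
-- def _cli_show_to_xml(cmd: str) -> Optional[str]:
--     """Convert plain CLI 'show ...' into nested op-XML with a self-closing leaf."""
--     try:
--         parts = [p for p in (cmd or '').strip().split() if p]
--         if not parts or parts[0].lower() != 'show':
--             return None
--
--         def wrap(ts):
--             if len(ts) == 1:
--                 return f'<{ts[0]}/>'
--             return f'<{ts[0]}>{wrap(ts[1:])}</{ts[0]}>'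
--
--         return wrap(['show'] + parts[1:])
--     except Exception:
--         return None
-- ===== Notes on version B (the rewrite author's own statement) =====
-- stated objective: alternative
-- what changed: Replaces A's staged flat-list construction (opening tags, leaf, reversed closing tags, special '<show/>' branch, final join) with one recursive inside-out wrapper applied uniformly to ['show'] + tokens, so the empty-token case and the nesting fall out of a single recursion.
import Mathlib
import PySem

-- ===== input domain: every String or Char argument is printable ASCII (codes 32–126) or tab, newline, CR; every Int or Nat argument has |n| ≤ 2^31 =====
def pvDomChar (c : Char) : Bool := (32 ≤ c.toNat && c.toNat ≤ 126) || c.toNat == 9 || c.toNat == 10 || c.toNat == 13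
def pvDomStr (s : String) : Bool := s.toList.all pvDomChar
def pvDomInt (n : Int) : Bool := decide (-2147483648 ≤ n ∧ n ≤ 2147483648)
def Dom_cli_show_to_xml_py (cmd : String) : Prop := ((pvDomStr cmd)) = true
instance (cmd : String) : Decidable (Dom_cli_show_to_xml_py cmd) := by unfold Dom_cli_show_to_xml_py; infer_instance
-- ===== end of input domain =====

-- B replaces A's staged flat-list build (opens, leaf, reversed closes, special '<show/>' branch,
-- final join) with one recursive inside-out wrapper over ['show'] ++ tokens; same cost.

-- ===== PORT A =====
-- parts = [p for p in (cmd or '').strip().split() if p]; build xml as a flat list and ''.join it.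
def cli_show_to_xml_py (cmd : String) : Option String :=
  let parts := (PySem.Str.split₀ (PySem.Str.strip cmd)).filter (fun p => p ≠ "")
  match parts with
  | [] => none
  | p0 :: tokens =>
    if PySem.Str.lower p0 ≠ "show" then none
    else
      match tokens with
      | [] => some "<show/>"
      | t :: ts =>
        let xml := ["<show>"]
          ++ (t :: ts).dropLast.map (fun x => "<" ++ x ++ ">")
          ++ ["<" ++ (t :: ts).getLast (by simp) ++ "/>"]
          ++ (t :: ts).dropLast.reverse.map (fun x => "</" ++ x ++ ">")
          ++ ["</show>"]
        some (PySem.Str.join "" xml)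

-- ===== PORT B =====
-- wrap(ts): a single token becomes its self-closing leaf, otherwise the head wraps wrap(rest);
-- applied uniformly to 'show' :: parts[1:] (the [] case is unreachable: wrap is called on a cons).
def wrapTokens : List String → String
  | [] => ""
  | [t] => "<" ++ t ++ "/>"
  | t :: r :: rs => "<" ++ t ++ ">" ++ wrapTokens (r :: rs) ++ "</" ++ t ++ ">"

def cli_show_to_xml_py_alt (cmd : String) : Option String :=
  match (PySem.Str.split₀ (PySem.Str.strip cmd)).filter (fun p => p ≠ "") with
  | [] => none
  | p0 :: rest =>
    if PySem.Str.lower p0 = "show" then some (wrapTokens ("show" :: rest)) else none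

-- ===== PRECONDITION & SPEC =====
def Spec_cli_show_to_xml_py (cmd : String) (out : Option String) : Prop := out = cli_show_to_xml_py_alt cmd
instance (cmd : String) (out : Option String) : Decidable (Spec_cli_show_to_xml_py cmd out) := by unfold Spec_cli_show_to_xml_py; infer_instance

-- ===== CLAIM (what is proved, stated in full; the proofs are below) =====
def Claim_equal_cli_show_to_xml_py : Prop := ∀ (cmd : String), Dom_cli_show_to_xml_py cmd → Spec_cli_show_to_xml_py cmd (cli_show_to_xml_py cmd)

-- ===== LEMMAS AND PROOFS =====

theorem join_empty_nil : PySem.Str.join "" [] = "" := by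
  apply String.toList_inj.mp
  simp [PySem.Str.toList_join, PySem.Chars.join_nil]

theorem join_empty_cons (x : String) (xs : List String) :
    PySem.Str.join "" (x :: xs) = x ++ PySem.Str.join "" xs := by
  apply String.toList_inj.mp
  cases xs with
  | nil =>
    simp [PySem.Str.toList_join, PySem.Chars.join_singleton, PySem.Chars.join_nil]
  | cons y ys =>
    simp [PySem.Str.toList_join, PySem.Chars.join_cons_cons]

theorem join_empty_append (xs ys : List String) :
    PySem.Str.join "" (xs ++ ys) = PySem.Str.join "" xs ++ PySem.Str.join "" ys := by
  induction xs with
  | nil =>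
    apply String.toList_inj.mp
    simp [join_empty_nil]
  | cons x xs ih =>
    apply String.toList_inj.mp
    simp [join_empty_cons, ih]

-- the recursive wrapper equals the join of opens ++ [leaf] ++ reversed closes
theorem wrapTokens_eq_join (t : String) (ts : List String) :
    wrapTokens (t :: ts)
      = PySem.Str.join ""
          ((t :: ts).dropLast.map (fun x => "<" ++ x ++ ">")
            ++ ["<" ++ (t :: ts).getLast (by simp) ++ "/>"]
            ++ (t :: ts).dropLast.reverse.map (fun x => "</" ++ x ++ ">")) := by
  induction ts generalizing t with
  | nil =>
    apply String.toList_inj.mp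
    simp [wrapTokens, join_empty_cons, join_empty_nil]
  | cons y ys ih =>
    have hd : (t :: y :: ys).dropLast = t :: (y :: ys).dropLast := by
      simp [List.dropLast]
    have hl : (t :: y :: ys).getLast (by simp) = (y :: ys).getLast (by simp) := by
      simp [List.getLast]
    apply String.toList_inj.mp
    rw [hd, hl, wrapTokens, ih y]
    simp [join_empty_cons, join_empty_append, join_empty_nil, List.append_assoc]

-- ===== VERDICT (by name: the statement is the Claim_ definition above) =====
theorem cli_show_to_xml_py_spec : Claim_equal_cli_show_to_xml_py := by
  intro cmd _
  unfold Spec_cli_show_to_xml_py cli_show_to_xml_py cli_show_to_xml_py_alt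
  cases hp : (PySem.Str.split₀ (PySem.Str.strip cmd)).filter (fun p => p ≠ "") with
  | nil => rfl
  | cons p0 tokens =>
    by_cases hshow : PySem.Str.lower p0 = "show"
    · cases tokens with
      | nil => simp [hshow, wrapTokens]
      | cons t ts =>
        simp only [hshow, ite_true, wrapTokens, wrapTokens_eq_join t ts]
        apply congrArg some
        apply String.toList_inj.mp
        simp [join_empty_cons, join_empty_append, join_empty_nil]
    · simp [hshow]
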